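-- pv_equiv track=rewrite | github.com/lilanpei/AI-based-Autonomic-Management-of-Structured-Parallel-Programs | orchestrator/utilities.py | find_next_available_function_names
-- ===== SOURCE A (Python) =====
-- def find_next_available_function_names(function_name_prefix, existing_indices, count):
--     """
--     Given existing indices and count, find next `count` available function names.
--     Reuses missing indices first.
--     """
--     allocated = []
--     index = 1
--     existing_set = set(existing_indices)
--
--     while len(allocated) < count:
--         if index not in existing_set:
--             allocated.append(f"{function_name_prefix}-{index}")
--         index += 1
--
--     return allocated
-- ===== SOURCE B (Python) =====
-- def find_next_available_function_names(function_name_prefix, existing_indices, count):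
--     names = []
--     candidate = 1
--     for v in sorted({i for i in existing_indices if i >= 1}):
--         while candidate < v and len(names) < count:
--             names.append(f"{function_name_prefix}-{candidate}")
--             candidate += 1
--         if len(names) >= count:
--             break
--         candidate = v + 1
--     while len(names) < count:
--         names.append(f"{function_name_prefix}-{candidate}")
--         candidate += 1
--     return names
-- ===== Notes on version B (the rewrite author's own statement) =====
-- stated objective: alternative
-- what changed: A scans every integer index 1,2,3,... testing set membership until count names are collected; B instead sorts the deduplicated positive occupied indices once and walks that sorted list, emitting whole gaps between consecutive occupied values and then appending past the maximum, never probing occupied indices one at a time.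
import Mathlib
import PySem

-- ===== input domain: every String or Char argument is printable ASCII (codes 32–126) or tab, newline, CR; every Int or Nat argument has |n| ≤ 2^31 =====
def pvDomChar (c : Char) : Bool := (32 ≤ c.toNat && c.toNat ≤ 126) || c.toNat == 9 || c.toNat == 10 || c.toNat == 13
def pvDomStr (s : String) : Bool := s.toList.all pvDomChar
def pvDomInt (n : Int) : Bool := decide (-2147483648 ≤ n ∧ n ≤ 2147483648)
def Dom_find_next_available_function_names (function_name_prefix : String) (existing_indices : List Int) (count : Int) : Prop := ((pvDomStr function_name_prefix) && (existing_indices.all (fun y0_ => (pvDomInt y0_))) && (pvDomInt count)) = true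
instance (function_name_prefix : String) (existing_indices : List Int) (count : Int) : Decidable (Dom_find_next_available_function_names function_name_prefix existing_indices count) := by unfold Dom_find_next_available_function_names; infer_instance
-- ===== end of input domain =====

-- ===== PORT A =====
-- B walks the sorted deduplicated positive occupied indices instead of probing every integer index; return values proved equal (objective: alternative).
def pvName (pre : String) (i : Int) : String := pre ++ "-" ++ PySem.Int.toStr i

-- termination helper for A's while loop (cited by pvLoopA's decreasing_by)
theorem pvFilterDec (S : List Int) (i : Int) (h : i ∈ S) :
    (S.filter (fun x => decide (i + 1 ≤ x))).length < (S.filter (fun x => decide (i ≤ x))).length := by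
  have hsub : List.Sublist (S.filter (fun x => decide (i + 1 ≤ x))) (S.filter (fun x => decide (i ≤ x))) :=
    List.monotone_filter_right S (by intro a ha; simp only [decide_eq_true_eq] at ha ⊢; omega)
  have hle := hsub.length_le
  rcases Nat.lt_or_eq_of_le hle with h' | h'
  · exact h'
  · exfalso
    have := hsub.eq_of_length h'
    have hmm : i ∈ S.filter (fun x => decide (i ≤ x)) := by
      simp [List.mem_filter, h]
    rw [← this] at hmm
    simp [List.mem_filter] at hmm

-- A: while len(allocated) < count: if index not in existing_set: append; index += 1
def pvLoopA (pre : String) (S : List Int) : Nat → Int → List String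
  | 0, _ => []
  | n + 1, i =>
    if h : PySem.Set.contains S i then pvLoopA pre S (n + 1) (i + 1)
    else pvName pre i :: pvLoopA pre S n (i + 1)
termination_by n i => (n, (S.filter (fun x => decide (i ≤ x))).length)
decreasing_by
  all_goals simp_wf
  all_goals first
    | exact Prod.Lex.right _ (pvFilterDec S i ((PySem.Set.contains_iff S i).mp h))
    | exact Prod.Lex.left _ _ (Nat.lt_succ_self n)

def find_next_available_function_names (function_name_prefix : String) (existing_indices : List Int) (count : Int) : List String :=
  pvLoopA function_name_prefix (PySem.Set.ofList existing_indices) count.toNat 1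

-- ===== PORT B =====
-- trailing while: while len(names) < count: append name(candidate); candidate += 1
def pvTailEmit (pre : String) : Int → Nat → List String
  | _, 0 => []
  | c, n + 1 => pvName pre c :: pvTailEmit pre (c + 1) n

-- inner while: while candidate < v and len(names) < count: append; candidate += 1
-- returns (emitted names, final candidate, remaining budget)
def pvEmitRange (pre : String) : Int → Int → Nat → List String × Int × Nat
  | c, _, 0 => ([], c, 0)
  | c, v, n + 1 =>
    if c < v then
      let r := pvEmitRange pre (c + 1) v n
      (pvName pre c :: r.1, r.2.1, r.2.2)
    else ([], c, n + 1)

-- for v in sorted list: fill the gap below v, break if budget exhausted, else jump past v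
def pvLoopB (pre : String) : List Int → Int → Nat → List String
  | [], c, n => pvTailEmit pre c n
  | v :: rest, c, n =>
    let r := pvEmitRange pre c v n
    if r.2.2 = 0 then r.1
    else r.1 ++ pvLoopB pre rest (v + 1) r.2.2

def find_next_available_function_names_alt (function_name_prefix : String) (existing_indices : List Int) (count : Int) : List String :=
  pvLoopB function_name_prefix
    (PySem.List.sorted (PySem.Set.ofList (existing_indices.filter (fun i => decide (1 ≤ i)))) (fun x => x) false)
    1 count.toNat

-- ===== PRECONDITION & SPEC =====
def Spec_find_next_available_function_names (function_name_prefix : String) (existing_indices : List Int) (count : Int) (out : List String) : Prop := out = find_next_available_function_names_alt function_name_prefix existing_indices count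
instance (function_name_prefix : String) (existing_indices : List Int) (count : Int) (out : List String) : Decidable (Spec_find_next_available_function_names function_name_prefix existing_indices count out) := by unfold Spec_find_next_available_function_names; infer_instance

-- ===== CLAIM (what is proved, stated in full; the proofs are below) =====
def Claim_equal_find_next_available_function_names : Prop := ∀ (function_name_prefix : String) (existing_indices : List Int) (count : Int), Dom_find_next_available_function_names function_name_prefix existing_indices count → Spec_find_next_available_function_names function_name_prefix existing_indices count (find_next_available_function_names function_name_prefix existing_indices count)

-- ===== LEMMAS AND PROOFS =====

theorem pvLoopB_zero (pre : String) (l : List Int) (c : Int) : pvLoopB pre l c 0 = [] := by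
  cases l <;> simp [pvLoopB, pvTailEmit, pvEmitRange]

-- occupied head: candidate equals the head of the sorted occupied list
theorem pvLoopB_occ (pre : String) (rest : List Int) (c : Int) (n : Nat) :
    pvLoopB pre (c :: rest) c n = pvLoopB pre rest (c + 1) n := by
  cases n with
  | zero => simp [pvLoopB_zero, pvLoopB, pvEmitRange]
  | succ n => simp [pvLoopB, pvEmitRange]

-- free candidate below the head: one name is emitted
theorem pvLoopB_free (pre : String) (v : Int) (rest : List Int) (c : Int) (n : Nat) (hcv : c < v) :
    pvLoopB pre (v :: rest) c (n + 1) = pvName pre c :: pvLoopB pre (v :: rest) (c + 1) n := by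
  simp only [pvLoopB, pvEmitRange, if_pos hcv]
  by_cases h : (pvEmitRange pre (c + 1) v n).2.2 = 0 <;> simp [h]

-- free candidate past the whole list
theorem pvLoopB_nil_free (pre : String) (c : Int) (n : Nat) :
    pvLoopB pre [] c (n + 1) = pvName pre c :: pvLoopB pre [] (c + 1) n := by
  simp [pvLoopB, pvTailEmit]

theorem pvFilterMono (S : List Int) (i : Int) :
    (S.filter (fun x => decide (i + 1 ≤ x))).length ≤ (S.filter (fun x => decide (i ≤ x))).length :=
  (List.monotone_filter_right S
    (by intro a ha; simp only [decide_eq_true_eq] at ha ⊢; omega)).length_le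

theorem pvMain (pre : String) (S : List Int) : ∀ (m n : Nat) (i : Int) (l : List Int),
    n + (S.filter (fun x => decide (i ≤ x))).length ≤ m →
    l.Pairwise (· < ·) →
    (∀ x, x ∈ l ↔ x ∈ S ∧ i ≤ x) →
    pvLoopA pre S n i = pvLoopB pre l i n := by
  intro m
  induction m with
  | zero =>
    intro n i l hm _ _
    have hn : n = 0 := by omega
    subst hn
    rw [pvLoopA, pvLoopB_zero]
  | succ m ih =>
    intro n i l hm hpw hmem
    cases n with
    | zero => rw [pvLoopA, pvLoopB_zero]
    | succ n =>
      by_cases hS : i ∈ S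
      · -- occupied: A skips this index, B's sorted list has head i
        have hil : i ∈ l := (hmem i).mpr ⟨hS, le_refl i⟩
        obtain ⟨t, rfl⟩ : ∃ t, l = i :: t := by
          cases l with
          | nil => simp at hil
          | cons a t =>
            have haS := (hmem a).mp List.mem_cons_self
            have ha2 := haS.2
            rcases List.mem_cons.mp hil with h' | h'
            · exact ⟨t, by rw [h']⟩
            · have := (List.pairwise_cons.mp hpw).1 i h'
              omega
        rw [pvLoopA, dif_pos ((PySem.Set.contains_iff S i).mpr hS), pvLoopB_occ]
        apply ih (n + 1) (i + 1) t
        · have := pvFilterDec S i hS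
          omega
        · exact (List.pairwise_cons.mp hpw).2
        · intro x
          constructor
          · intro hx
            have hx' := (hmem x).mp (List.mem_cons_of_mem _ hx)
            have := (List.pairwise_cons.mp hpw).1 x hx
            exact ⟨hx'.1, by omega⟩
          · intro ⟨hxS, hxi⟩
            have hx' := (hmem x).mpr ⟨hxS, by omega⟩
            rcases List.mem_cons.mp hx' with h' | h'
            · omega
            · exact h'
      · -- free: A emits a name, and so does B (B's list is empty or its head is > i)
        have hstep : pvLoopB pre l i (n + 1) = pvName pre i :: pvLoopB pre l (i + 1) n := by
          cases l with
          | nil => exact pvLoopB_nil_free pre i n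
          | cons a t =>
            have haS := (hmem a).mp List.mem_cons_self
            have hia : i < a := by
              rcases lt_or_eq_of_le haS.2 with h' | h'
              · exact h'
              · exact absurd (h' ▸ haS.1) hS
            exact pvLoopB_free pre a t i n hia
        rw [pvLoopA, dif_neg (fun hc => hS ((PySem.Set.contains_iff S i).mp hc)), hstep]
        congr 1
        apply ih n (i + 1) l
        · have := pvFilterMono S i
          omega
        · exact hpw
        · intro x
          rw [hmem x]
          constructor
          · intro ⟨h1, h2⟩
            refine ⟨h1, ?_⟩
            rcases lt_or_eq_of_le h2 with h' | h'
            · omega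
            · exact absurd (h' ▸ h1) hS
          · intro ⟨h1, h2⟩
            exact ⟨h1, by omega⟩

-- ===== VERDICT (by name: the statement is the Claim_ definition above) =====
theorem find_next_available_function_names_spec : Claim_equal_find_next_available_function_names := by
  intro pre ex c _
  unfold Spec_find_next_available_function_names
  unfold find_next_available_function_names find_next_available_function_names_alt
  refine pvMain pre (PySem.Set.ofList ex)
    (c.toNat + ((PySem.Set.ofList ex).filter (fun x => decide ((1 : Int) ≤ x))).length)
    c.toNat 1 _ (le_refl _)
    (PySem.List.sorted_ofList_pairwise_lt (xs := ex.filter (fun i => decide (1 ≤ i)))) ?_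
  intro x
  rw [PySem.List.mem_sorted, PySem.Set.mem_ofList, List.mem_filter, PySem.Set.mem_ofList]
  simp
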